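-- pv_equiv track=rewrite | github.com/infobyte/faraday | scripts/merge-conflict-detector.py | version_of_branch
-- ===== SOURCE A (Python) =====
-- VERSIONS = ['white', 'black']
--
-- def version_of_branch(branch_name):
--     """
--     >>> version_of_branch('tkt_white_this_is_not_a_ee_branch')
--     'white'
--     """
--     positions = {version: branch_name.find(version)
--                  for version in VERSIONS}
--     if all((pos < 0) for pos in positions.values()):
--         # The branch name doesn't contain white, pink or black
--         return
--     positions = {version: pos
--                  for (version, pos) in positions.items()
--                  if pos >= 0}
--     return min(positions.keys(), key=positions.get)
-- ===== SOURCE B (Python) =====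
-- VERSIONS = ['white', 'black']
--
-- def version_of_branch(branch_name):
--     """
--     >>> version_of_branch('tkt_white_this_is_not_a_ee_branch')
--     'white'
--     """
--     for i in range(len(branch_name)):
--         for version in VERSIONS:
--             if branch_name.startswith(version, i):
--                 return version
--     return None
-- ===== Notes on version B (the rewrite author's own statement) =====
-- stated objective: simpler
-- what changed: B replaces the dict of str.find positions plus min-by-position with a single left-to-right scan over string positions that returns the first keyword matching via startswith, so no dict, filter or min is built.
import Mathlib
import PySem

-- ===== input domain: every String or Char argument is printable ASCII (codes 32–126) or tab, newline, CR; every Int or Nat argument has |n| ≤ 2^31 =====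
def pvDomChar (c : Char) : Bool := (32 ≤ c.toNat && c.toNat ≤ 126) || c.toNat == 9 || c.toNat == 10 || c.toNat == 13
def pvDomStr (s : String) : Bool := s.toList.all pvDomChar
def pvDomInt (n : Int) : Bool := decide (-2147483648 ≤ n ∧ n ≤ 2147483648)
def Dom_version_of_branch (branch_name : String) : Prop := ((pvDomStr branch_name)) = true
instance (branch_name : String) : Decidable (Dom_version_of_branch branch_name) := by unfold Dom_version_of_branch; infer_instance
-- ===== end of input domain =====

-- B replaces A's dict of str.find positions + min-by-position with a single left-to-right
-- scan that returns the first keyword matching at the current position (objective: simpler).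

def VERSIONS : List String := ["white", "black"]

-- ===== PORT A =====
def version_of_branch (branch_name : String) : Option String :=
  let positions : PySem.Dict String Int :=
    VERSIONS.foldl (fun d version => d.insert version (PySem.Str.find branch_name version)) ∅
  if positions.values.all (fun pos => decide (pos < 0)) then
    none
  else
    let positions2 : PySem.Dict String Int :=
      positions.items.foldl (fun d kv => if 0 ≤ kv.2 then d.insert kv.1 kv.2 else d) ∅
    -- min(positions.keys(), key=positions.get): every key is present in the dict,
    -- so Python's .get (an Option) always returns the stored Int; getD with any default is exact here
    PySem.List.min? positions2.keys (fun version => positions2.getD version 0)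

-- ===== PORT B =====
-- for i in range(len(branch_name)): for version in VERSIONS: if branch_name.startswith(version, i): return version
-- scanning suffixes: branch_name.startswith(version, i) = Chars.startswith (toList.drop i) version.toList
def altScan (versions : List String) : List Char → Option String
  | [] => none
  | c :: rest =>
    match versions.find? (fun v => PySem.Chars.startswith (c :: rest) v.toList) with
    | some v => some v
    | none => altScan versions rest

def version_of_branch_alt (branch_name : String) : Option String :=
  altScan VERSIONS branch_name.toList

-- ===== PRECONDITION & SPEC =====
def Spec_version_of_branch (branch_name : String) (out : Option String) : Prop := out = version_of_branch_alt branch_name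
instance (branch_name : String) (out : Option String) : Decidable (Spec_version_of_branch branch_name out) := by unfold Spec_version_of_branch; infer_instance

-- ===== CLAIM (what is proved, stated in full; the proofs are below) =====
def Claim_equal_version_of_branch : Prop := ∀ (branch_name : String), Dom_version_of_branch branch_name → Spec_version_of_branch branch_name (version_of_branch branch_name)

-- ===== LEMMAS AND PROOFS =====

theorem dict_empty_items : (∅ : PySem.Dict String Int).items = [] := rfl

-- A evaluated: a case formula over the two find positions
set_option maxHeartbeats 1000000 in
theorem A_eval (bn : String) :
    version_of_branch bn =
      (let fw := PySem.Chars.find bn.toList "white".toList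
       let fb := PySem.Chars.find bn.toList "black".toList
       if fw < 0 ∧ fb < 0 then none
       else if fw < 0 then some "black"
       else if fb < 0 then some "white"
       else if fw ≤ fb then some "white" else some "black") := by
  unfold version_of_branch
  have hws : ("white" : String).toList = ['w','h','i','t','e'] := rfl
  have hbs : ("black" : String).toList = ['b','l','a','c','k'] := rfl
  rcases lt_or_ge (PySem.Chars.find bn.toList ['w','h','i','t','e']) 0 with hw|hw <;>
    rcases lt_or_ge (PySem.Chars.find bn.toList ['b','l','a','c','k']) 0 with hb|hb
  · simp [VERSIONS, PySem.Dict.insert, PySem.Dict.contains, PySem.Dict.values,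
      PySem.Dict.keys, PySem.Dict.getD, PySem.Dict.get?, PySem.List.min?,
      PySem.Str.find_eq, dict_empty_items, hws, hbs, hw, hb, (not_le.mpr hw), (not_le.mpr hb)]
  · simp [VERSIONS, PySem.Dict.insert, PySem.Dict.contains, PySem.Dict.values,
      PySem.Dict.keys, PySem.Dict.getD, PySem.Dict.get?, PySem.List.min?,
      PySem.Str.find_eq, dict_empty_items, hws, hbs, hw, hb, (not_le.mpr hw), (not_lt.mpr hb)]
  · simp [VERSIONS, PySem.Dict.insert, PySem.Dict.contains, PySem.Dict.values,
      PySem.Dict.keys, PySem.Dict.getD, PySem.Dict.get?, PySem.List.min?,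
      PySem.Str.find_eq, dict_empty_items, hws, hbs, hw, hb, (not_lt.mpr hw), (not_le.mpr hb)]
  · simp [VERSIONS, PySem.Dict.insert, PySem.Dict.contains, PySem.Dict.values,
      PySem.Dict.keys, PySem.Dict.getD, PySem.Dict.get?, PySem.List.min?,
      PySem.Str.find_eq, dict_empty_items, hws, hbs, hw, hb, (not_lt.mpr hw), (not_lt.mpr hb),
      List.foldl]
    split_ifs <;> first | rfl | omega

-- B returns none when no keyword occurs anywhere
theorem scan_none (l : List Char)
    (hw : ∀ i, ¬ "white".toList <+: l.drop i)
    (hb : ∀ i, ¬ "black".toList <+: l.drop i) :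
    altScan VERSIONS l = none := by
  induction l with
  | nil => rfl
  | cons c rest ih =>
    have h0w : PySem.Chars.startswith (c :: rest) ['w','h','i','t','e'] = false := by
      rw [Bool.eq_false_iff, Ne, PySem.Chars.startswith_iff]; exact hw 0
    have h0b : PySem.Chars.startswith (c :: rest) ['b','l','a','c','k'] = false := by
      rw [Bool.eq_false_iff, Ne, PySem.Chars.startswith_iff]; exact hb 0
    rw [altScan]
    simp [VERSIONS, List.find?, h0w, h0b]
    exact ih (fun i => hw (i + 1)) (fun i => hb (i + 1))

theorem scan_white (n : ℕ) (l : List Char)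
    (hw : "white".toList <+: l.drop n)
    (hmw : ∀ i < n, ¬ "white".toList <+: l.drop i)
    (hmb : ∀ i < n, ¬ "black".toList <+: l.drop i) :
    altScan VERSIONS l = some "white" := by
  induction n generalizing l with
  | zero =>
    simp only [List.drop_zero] at hw
    obtain ⟨c, rest, rfl⟩ : ∃ c rest, l = c :: rest := by
      cases l with
      | nil => simp [List.prefix_nil] at hw
      | cons c rest => exact ⟨c, rest, rfl⟩
    have h1w : PySem.Chars.startswith (c :: rest) ['w','h','i','t','e'] = true :=
      (PySem.Chars.startswith_iff _ _).mpr hw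
    rw [altScan]
    simp [VERSIONS, List.find?, h1w]
  | succ k ih =>
    obtain ⟨c, rest, rfl⟩ : ∃ c rest, l = c :: rest := by
      cases l with
      | nil => simp [List.prefix_nil] at hw
      | cons c rest => exact ⟨c, rest, rfl⟩
    have h0w : PySem.Chars.startswith (c :: rest) ['w','h','i','t','e'] = false := by
      rw [Bool.eq_false_iff, Ne, PySem.Chars.startswith_iff]; exact hmw 0 (Nat.succ_pos k)
    have h0b : PySem.Chars.startswith (c :: rest) ['b','l','a','c','k'] = false := by
      rw [Bool.eq_false_iff, Ne, PySem.Chars.startswith_iff]; exact hmb 0 (Nat.succ_pos k)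
    rw [altScan]
    simp [VERSIONS, List.find?, h0w, h0b]
    exact ih rest hw (fun i hi => hmw (i + 1) (Nat.succ_lt_succ hi))
      (fun i hi => hmb (i + 1) (Nat.succ_lt_succ hi))

theorem scan_black (n : ℕ) (l : List Char)
    (hb : "black".toList <+: l.drop n)
    (hmb : ∀ i < n, ¬ "black".toList <+: l.drop i)
    (hnw : ∀ i ≤ n, ¬ "white".toList <+: l.drop i) :
    altScan VERSIONS l = some "black" := by
  induction n generalizing l with
  | zero =>
    simp only [List.drop_zero] at hb
    obtain ⟨c, rest, rfl⟩ : ∃ c rest, l = c :: rest := by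
      cases l with
      | nil => simp [List.prefix_nil] at hb
      | cons c rest => exact ⟨c, rest, rfl⟩
    have h0w : PySem.Chars.startswith (c :: rest) ['w','h','i','t','e'] = false := by
      rw [Bool.eq_false_iff, Ne, PySem.Chars.startswith_iff]; exact hnw 0 (Nat.zero_le 0)
    have h1b : PySem.Chars.startswith (c :: rest) ['b','l','a','c','k'] = true :=
      (PySem.Chars.startswith_iff _ _).mpr hb
    rw [altScan]
    simp [VERSIONS, List.find?, h0w, h1b]
  | succ k ih =>
    obtain ⟨c, rest, rfl⟩ : ∃ c rest, l = c :: rest := by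
      cases l with
      | nil => simp [List.prefix_nil] at hb
      | cons c rest => exact ⟨c, rest, rfl⟩
    have h0w : PySem.Chars.startswith (c :: rest) ['w','h','i','t','e'] = false := by
      rw [Bool.eq_false_iff, Ne, PySem.Chars.startswith_iff]; exact hnw 0 (Nat.zero_le _)
    have h0b : PySem.Chars.startswith (c :: rest) ['b','l','a','c','k'] = false := by
      rw [Bool.eq_false_iff, Ne, PySem.Chars.startswith_iff]; exact hmb 0 (Nat.succ_pos k)
    rw [altScan]
    simp [VERSIONS, List.find?, h0w, h0b]
    exact ih rest hb (fun i hi => hmb (i + 1) (Nat.succ_lt_succ hi))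
      (fun i hi => hnw (i + 1) (Nat.succ_le_succ hi))

-- from find = -1: the pattern is a prefix of no suffix
theorem no_occ (l sub : List Char) (h : PySem.Chars.find l sub = -1) :
    ∀ i, ¬ sub <+: l.drop i := by
  intro i hpre
  have hinf : ¬ sub <:+: l := (PySem.Chars.find_eq_neg_one_iff l sub).mp h
  exact hinf (((PySem.Chars.isIn_iff_infix sub l)).mp
    ((PySem.Chars.exists_prefix_drop_iff_isIn sub l).mp ⟨i, hpre⟩))

-- ===== VERDICT (by name: the statement is the Claim_ definition above) =====
theorem version_of_branch_spec : Claim_equal_version_of_branch := by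
  intro bn _
  unfold Spec_version_of_branch version_of_branch_alt
  rw [A_eval]
  have hge : -1 ≤ PySem.Chars.find bn.toList "white".toList := PySem.Chars.neg_one_le_find _ _
  have hgeb : -1 ≤ PySem.Chars.find bn.toList "black".toList := PySem.Chars.neg_one_le_find _ _
  by_cases hw : PySem.Chars.find bn.toList "white".toList < 0
  · have hwAll : ∀ i, ¬ "white".toList <+: bn.toList.drop i :=
      no_occ _ _ (by omega)
    by_cases hb : PySem.Chars.find bn.toList "black".toList < 0
    · have hbAll : ∀ i, ¬ "black".toList <+: bn.toList.drop i :=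
        no_occ _ _ (by omega)
      simp only [hw, hb, and_self, if_true]
      exact (scan_none bn.toList hwAll hbAll).symm
    · have hb0 : 0 ≤ PySem.Chars.find bn.toList "black".toList := by omega
      obtain ⟨hpre, hmin⟩ := PySem.Chars.find_spec hb0
      simp only [hw, hb, and_false, if_false, if_true]
      exact (scan_black _ bn.toList hpre hmin (fun i _ => hwAll i)).symm
  · have hw0 : 0 ≤ PySem.Chars.find bn.toList "white".toList := by omega
    obtain ⟨hpreW, hminW⟩ := PySem.Chars.find_spec hw0
    by_cases hb : PySem.Chars.find bn.toList "black".toList < 0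
    · have hbAll : ∀ i, ¬ "black".toList <+: bn.toList.drop i :=
        no_occ _ _ (by omega)
      simp only [hw, hb, false_and, if_false, if_true]
      exact (scan_white _ bn.toList hpreW hminW (fun i _ => hbAll i)).symm
    · have hb0 : 0 ≤ PySem.Chars.find bn.toList "black".toList := by omega
      obtain ⟨hpreB, hminB⟩ := PySem.Chars.find_spec hb0
      simp only [hw, hb, false_and, and_false, if_false]
      by_cases hle : PySem.Chars.find bn.toList "white".toList ≤ PySem.Chars.find bn.toList "black".toList
      · simp only [hle, if_true]
        exact (scan_white _ bn.toList hpreW hminW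
          (fun i hi => hminB i (by omega))).symm
      · simp only [hle, if_false]
        exact (scan_black _ bn.toList hpreB hminB
          (fun i hi => hminW i (by omega))).symm
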